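-- pv_equiv track=rewrite | github.com/thatjamesw/password_generator | password_generator.py | filtered_charset
-- ===== SOURCE A (Python) =====
-- from typing import List
--
-- SIMILAR_CHARS = set("Il1O0B8G6S5Z2")
--
-- AMBIGUOUS_SYMBOLS = set("{}[]()/\\'\"`~,;:.<>")
--
-- def filtered_charset(chars: str, exclude_similar: bool, preserve_duplicates: bool = False) -> List[str]:
--     filtered: List[str] = []
--     seen = set()
--     for char in chars:
--         if exclude_similar and (char in SIMILAR_CHARS or char in AMBIGUOUS_SYMBOLS):
--             continue
--         if not preserve_duplicates and char in seen:
--             continue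
--         filtered.append(char)
--         seen.add(char)
--     return filtered
-- ===== SOURCE B (Python) =====
-- from typing import List
--
-- SIMILAR_CHARS = set("Il1O0B8G6S5Z2")
--
-- AMBIGUOUS_SYMBOLS = set("{}[]()/\\'\"`~,;:.<>")
--
-- def _dedup_dc(items: List[str]) -> List[str]:
--     # divide and conquer: dedup each half, then keep the right half's
--     # survivors that the left half has not already produced
--     if len(items) < 2:
--         return items
--     mid = len(items) // 2
--     left = _dedup_dc(items[:mid])
--     right = _dedup_dc(items[mid:])
--     return left + [c for c in right if c not in left]
--
-- def filtered_charset(chars: str, exclude_similar: bool, preserve_duplicates: bool = False) -> List[str]: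
--     # pass 1: keep only the allowed characters
--     allowed = [c for c in chars
--                if not (exclude_similar and (c in SIMILAR_CHARS or c in AMBIGUOUS_SYMBOLS))]
--     if preserve_duplicates:
--         return allowed
--     # pass 2: first-occurrence dedup by divide and conquer (no seen-set, no dict)
--     return _dedup_dc(allowed)
-- ===== Notes on version B (the rewrite author's own statement) =====
-- stated objective: alternative
-- what changed: Replaces A's single stateful loop with a seen-set by two passes: a stateless filter, then a first-occurrence dedup computed by divide and conquer (dedup each half recursively, then append the right half's survivors not already in the left result) instead of any seen-set or dict.
import Mathlib
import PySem

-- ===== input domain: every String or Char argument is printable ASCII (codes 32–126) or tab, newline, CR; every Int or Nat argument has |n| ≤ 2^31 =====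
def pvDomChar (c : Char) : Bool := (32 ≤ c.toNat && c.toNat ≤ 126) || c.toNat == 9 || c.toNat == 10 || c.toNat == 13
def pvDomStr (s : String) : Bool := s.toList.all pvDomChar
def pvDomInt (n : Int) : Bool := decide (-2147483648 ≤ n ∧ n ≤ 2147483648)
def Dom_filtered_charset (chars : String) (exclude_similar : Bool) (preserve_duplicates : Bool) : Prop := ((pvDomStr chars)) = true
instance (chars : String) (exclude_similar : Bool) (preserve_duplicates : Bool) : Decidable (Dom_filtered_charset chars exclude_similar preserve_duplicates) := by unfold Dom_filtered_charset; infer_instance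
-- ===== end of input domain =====

-- B replaces A's single stateful seen-set loop by two passes: a stateless filter, then a divide-and-conquer first-occurrence dedup (no seen-set or dict): an alternative algorithm, not claimed faster.


-- ===== PORT A =====
-- SIMILAR_CHARS / AMBIGUOUS_SYMBOLS: Python sets of 1-character strings
def pvSIMILAR : PySem.Set String := PySem.Set.ofList ("Il1O0B8G6S5Z2".toList.map (fun c => String.mk [c]))
def pvAMBIGUOUS : PySem.Set String := PySem.Set.ofList ("{}[]()/\\'\"`~,;:.<>".toList.map (fun c => String.mk [c]))

def filtered_charset (chars : String) (exclude_similar : Bool) (preserve_duplicates : Bool) : List String :=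
  -- filtered = []; seen = set(); for char in chars: …
  (((chars.toList.map (fun c => String.mk [c])).foldl
      (fun (st : List String × PySem.Set String) char =>
        if exclude_similar && (pvSIMILAR.contains char || pvAMBIGUOUS.contains char) then st
        else if !preserve_duplicates && st.2.contains char then st
        else (st.1 ++ [char], st.2.add char))
      ([], PySem.Set.empty))).1

-- ===== PORT B =====
-- _dedup_dc: items[:mid] / items[mid:] with 0 <= mid <= len are exactly take/drop (PySem.List.slice_to_natCast / slice_from_natCast)
def pv_dedup_dc (items : List String) : List String :=
  if items.length < 2 then items
  else
    let mid := items.length / 2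
    let left := pv_dedup_dc (items.take mid)
    let right := pv_dedup_dc (items.drop mid)
    left ++ right.filter (fun c => !left.contains c)
termination_by items.length
decreasing_by
  · simp; omega
  · simp; omega

def filtered_charset_alt (chars : String) (exclude_similar : Bool) (preserve_duplicates : Bool) : List String :=
  -- allowed = [c for c in chars if not (exclude_similar and (...))]
  let allowed := (chars.toList.map (fun c => String.mk [c])).filter
      (fun c => !(exclude_similar && (pvSIMILAR.contains c || pvAMBIGUOUS.contains c)))
  if preserve_duplicates then allowed
  else pv_dedup_dc allowed

-- ===== PRECONDITION & SPEC =====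
def Spec_filtered_charset (chars : String) (exclude_similar : Bool) (preserve_duplicates : Bool) (out : List String) : Prop := out = filtered_charset_alt chars exclude_similar preserve_duplicates
instance (chars : String) (exclude_similar : Bool) (preserve_duplicates : Bool) (out : List String) : Decidable (Spec_filtered_charset chars exclude_similar preserve_duplicates out) := by unfold Spec_filtered_charset; infer_instance

-- ===== CLAIM (what is proved, stated in full; the proofs are below) =====
def Claim_equal_filtered_charset : Prop := ∀ (chars : String) (exclude_similar : Bool) (preserve_duplicates : Bool), Dom_filtered_charset chars exclude_similar preserve_duplicates → Spec_filtered_charset chars exclude_similar preserve_duplicates (filtered_charset chars exclude_similar preserve_duplicates)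

-- ===== LEMMAS AND PROOFS =====

-- preserve_duplicates = true: A's loop just appends every non-excluded char
theorem pv_loop_append (p : String → Bool) :
    ∀ (l : List String) (acc : List String) (seen : PySem.Set String),
      (l.foldl (fun (st : List String × PySem.Set String) c =>
          if p c then st else (st.1 ++ [c], st.2.add c)) (acc, seen)).1
        = acc ++ l.filter (fun c => !p c) := by
  intro l
  induction l with
  | nil => simp
  | cons c l ih =>
    intro acc seen
    by_cases h : p c
    · simp [h, ih]
    · simp [h, ih]

-- preserve_duplicates = false: the accumulator list and the seen set stay equal (as lists)
theorem pv_loop_dedup (p : String → Bool) :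
    ∀ (l : List String) (s : PySem.Set String),
      l.foldl (fun (st : List String × PySem.Set String) c =>
          if p c then st else if st.2.contains c then st else (st.1 ++ [c], st.2.add c)) (s, s)
        = (l.foldl (fun t c => if p c then t else PySem.Set.add t c) s,
           l.foldl (fun t c => if p c then t else PySem.Set.add t c) s) := by
  intro l
  induction l with
  | nil => intro s; rfl
  | cons c l ih =>
    intro s
    simp only [List.foldl_cons]
    by_cases h : p c = true
    · rw [if_pos h, if_pos h]
      exact ih s
    · by_cases hc : PySem.Set.contains s c = true
      · have ha : PySem.Set.add s c = s := by
          unfold PySem.Set.add; rw [if_pos hc]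
        rw [if_neg h, if_pos hc, if_neg h, ha]
        exact ih s
      · have ha : PySem.Set.add s c = s ++ [c] := by
          unfold PySem.Set.add; rw [if_neg hc]
        rw [if_neg h, if_neg hc, if_neg h, ha]
        exact ih (s ++ [c])

-- skipping excluded chars in the set-fold = folding Set.add over the filtered list
theorem pv_foldl_add_filter (p : String → Bool) :
    ∀ (l : List String) (s : PySem.Set String),
      l.foldl (fun t c => if p c then t else PySem.Set.add t c) s
        = (l.filter (fun c => !p c)).foldl PySem.Set.add s := by
  intro l
  induction l with
  | nil => simp
  | cons c l ih =>
    intro s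
    by_cases h : p c
    · simp [h, ih]
    · simp [h, ih]

-- B's divide-and-conquer dedup computes exactly dict.fromkeys-style first-occurrence dedup
theorem pv_dedup_dc_eq (l : List String) : pv_dedup_dc l = PySem.List.dedup l := by
  induction l using pv_dedup_dc.induct with
  | case1 l h =>
    rw [pv_dedup_dc]
    rw [if_pos h]
    match l, h with
    | [], _ => rfl
    | [x], _ => rfl
  | case2 l h mid hl hr =>
    rw [pv_dedup_dc]
    rw [if_neg h]
    simp only [] at hl hr ⊢
    rw [hl, hr]
    simp only [PySem.List.dedup_eq_ofList]
    have : PySem.Set.ofList l = PySem.Set.ofList (l.take mid ++ l.drop mid) := by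
      rw [List.take_append_drop]
    rw [this, PySem.Set.ofList_append, PySem.Set.update_eq_append_filter]
    rfl

-- ===== VERDICT (by name: the statement is the Claim_ definition above) =====
theorem filtered_charset_spec : Claim_equal_filtered_charset := by
  intro chars ex pd _
  unfold Spec_filtered_charset filtered_charset filtered_charset_alt
  set l := chars.toList.map (fun c => String.mk [c]) with hl
  cases pd with
  | true =>
    simp only [Bool.not_true, Bool.false_and, Bool.false_eq_true, if_false, if_true]
    rw [pv_loop_append (fun c => ex && (pvSIMILAR.contains c || pvAMBIGUOUS.contains c))]
    simp
  | false =>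
    simp only [Bool.not_false, Bool.true_and, Bool.false_eq_true, if_false]
    have hinit : ((([] : List String), (PySem.Set.empty : PySem.Set String)) :
        List String × PySem.Set String) = (PySem.Set.empty, PySem.Set.empty) := rfl
    rw [hinit,
      pv_loop_dedup (fun c => ex && (pvSIMILAR.contains c || pvAMBIGUOUS.contains c)) l
        PySem.Set.empty,
      pv_dedup_dc_eq]
    simp only [PySem.List.dedup_eq_ofList, PySem.Set.ofList_eq_foldl]
    rw [pv_foldl_add_filter]
    rfl
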